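-- pv_equiv track=rewrite | github.com/kyleaforrester/ragnarook_chess | util/get_bitboard.py | rook_occupation_moves
-- ===== SOURCE A (Python) =====
-- import math
--
-- def rook_occupation_moves(i, occupations):
--     index_list = []
--     #North
--     y = 8
--     while (math.floor((i+y)/8) <= 7):
--         index_list.append(i+y)
--         if ((i+y) in occupations):
--             break
--         y += 8
--     #South
--     y = -8
--     while (math.floor((i+y)/8) >= 0):
--         index_list.append(i+y)
--         if ((i+y) in occupations):
--             break
--         y -= 8
--     #East
--     x = 1
--     while (((i+x)%8) > i%8 and ((i+x)%8) <= 7):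
--         index_list.append(i+x)
--         if ((i+x) in occupations):
--             break
--         x += 1
--     #West
--     x = -1
--     while (((i+x)%8) < i%8 and ((i+x)%8) >= 0):
--         index_list.append(i+x)
--         if ((i+x) in occupations):
--             break
--         x -= 1
--     return index_list
-- ===== SOURCE B (Python) =====
-- def rook_occupation_moves(i, occupations):
--     # Find the nearest blocker in each direction from occupations, then emit
--     # each ray as a single arithmetic range capped at (and including) it.
--     col = i % 8
--     nb = min([o for o in occupations if i < o < 64 and o % 8 == col], default=None)
--     sb = max([o for o in occupations if 0 <= o < i and o % 8 == col], default=None)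
--     eb = min([o for o in occupations if i < o <= i + 7 - col], default=None)
--     wb = max([o for o in occupations if i - col <= o < i], default=None)
--     moves = list(range(i + 8, 64 if nb is None else nb + 8, 8))
--     moves += range(i - 8, -1 if sb is None else sb - 8, -8)
--     moves += range(i + 1, i + 8 - col if eb is None else eb + 1)
--     moves += range(i - 1, i - col - 1 if wb is None else wb - 1, -1)
--     return moves
-- ===== Notes on version B (the rewrite author's own statement) =====
-- stated objective: alternative
-- what changed: Instead of A's four square-by-square ray walks with a membership test at every visited square, B computes the nearest blocker per direction with one min/max over a filtered copy of occupations and then emits each ray as a single arithmetic range() capped at (and including) that blocker.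
import Mathlib
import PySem

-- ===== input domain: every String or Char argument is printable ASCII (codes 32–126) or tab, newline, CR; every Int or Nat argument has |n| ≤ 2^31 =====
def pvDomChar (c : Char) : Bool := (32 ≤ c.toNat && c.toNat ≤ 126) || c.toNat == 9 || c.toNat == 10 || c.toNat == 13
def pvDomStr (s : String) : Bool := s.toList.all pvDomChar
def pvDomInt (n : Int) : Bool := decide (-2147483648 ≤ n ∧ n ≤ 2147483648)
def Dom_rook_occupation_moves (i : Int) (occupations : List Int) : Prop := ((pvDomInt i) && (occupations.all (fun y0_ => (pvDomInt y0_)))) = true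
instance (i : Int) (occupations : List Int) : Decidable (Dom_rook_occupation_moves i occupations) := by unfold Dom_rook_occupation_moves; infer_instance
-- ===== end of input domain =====

-- B replaces A's square-by-square ray walks with membership tests by one nearest-blocker
-- computation per direction (min/max over filtered occupations) followed by a direct
-- arithmetic range per ray (simpler decomposition; no per-square membership scan).

-- ===== PORT A =====
-- The four while-loops of A, one def each; the loop state (the offset and the
-- accumulated index_list) is carried as arguments.  Each loop recurses on a Nat
-- fuel that only makes the recursion structural: the fuel supplied at the call
-- sites below is proved sufficient (pv*_eq lemmas), so the fuel-0 branch is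
-- never taken on any input.  math.floor((i+y)/8) is exact floor division on
-- Dom's |int| ≤ 2^31 (doubles are exact there), so it is PySem.Int.floordiv.
def pvNorthA (i : Int) (occupations : List Int) : Nat → Int → List Int → List Int
  | 0, _, acc => acc
  | fuel + 1, y, acc =>
    if PySem.Int.floordiv (i + y) 8 ≤ 7 then
      if (i + y) ∈ occupations then acc ++ [i + y]
      else pvNorthA i occupations fuel (y + 8) (acc ++ [i + y])
    else acc

def pvSouthA (i : Int) (occupations : List Int) : Nat → Int → List Int → List Int
  | 0, _, acc => acc
  | fuel + 1, y, acc =>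
    if 0 ≤ PySem.Int.floordiv (i + y) 8 then
      if (i + y) ∈ occupations then acc ++ [i + y]
      else pvSouthA i occupations fuel (y - 8) (acc ++ [i + y])
    else acc

def pvEastA (i : Int) (occupations : List Int) : Nat → Int → List Int → List Int
  | 0, _, acc => acc
  | fuel + 1, x, acc =>
    if PySem.Int.mod i 8 < PySem.Int.mod (i + x) 8 ∧ PySem.Int.mod (i + x) 8 ≤ 7 then
      if (i + x) ∈ occupations then acc ++ [i + x]
      else pvEastA i occupations fuel (x + 1) (acc ++ [i + x])
    else acc

def pvWestA (i : Int) (occupations : List Int) : Nat → Int → List Int → List Int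
  | 0, _, acc => acc
  | fuel + 1, x, acc =>
    if PySem.Int.mod (i + x) 8 < PySem.Int.mod i 8 ∧ 0 ≤ PySem.Int.mod (i + x) 8 then
      if (i + x) ∈ occupations then acc ++ [i + x]
      else pvWestA i occupations fuel (x - 1) (acc ++ [i + x])
    else acc

def rook_occupation_moves (i : Int) (occupations : List Int) : List Int :=
  pvWestA i occupations 8 (-1)
    (pvEastA i occupations 8 1
      (pvSouthA i occupations (i + 1).toNat (-8)
        (pvNorthA i occupations (64 - i).toNat 8 [])))

-- ===== PORT B =====
-- transliteration of Source B: four filtered min/max (Python min/max(..., default=None)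
-- is Option-valued min?/max?), then one range per direction capped at the blocker.
def rook_occupation_moves_alt (i : Int) (occupations : List Int) : List Int :=
  let col := PySem.Int.mod i 8
  let nb := PySem.List.min? (occupations.filter
              (fun o => decide (i < o ∧ o < 64 ∧ PySem.Int.mod o 8 = col))) (fun x => x)
  let sb := PySem.List.max? (occupations.filter
              (fun o => decide (0 ≤ o ∧ o < i ∧ PySem.Int.mod o 8 = col))) (fun x => x)
  let eb := PySem.List.min? (occupations.filter
              (fun o => decide (i < o ∧ o ≤ i + 7 - col))) (fun x => x)
  let wb := PySem.List.max? (occupations.filter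
              (fun o => decide (i - col ≤ o ∧ o < i))) (fun x => x)
  PySem.List.pyRange (i + 8) (match nb with | none => 64 | some b => b + 8) 8
    ++ PySem.List.pyRange (i - 8) (match sb with | none => -1 | some b => b - 8) (-8)
    ++ PySem.List.pyRange (i + 1) (match eb with | none => i + 8 - col | some b => b + 1) 1
    ++ PySem.List.pyRange (i - 1) (match wb with | none => i - col - 1 | some b => b - 1) (-1)

-- ===== PRECONDITION & SPEC =====
def Spec_rook_occupation_moves (i : Int) (occupations : List Int) (out : List Int) : Prop := out = rook_occupation_moves_alt i occupations
instance (i : Int) (occupations : List Int) (out : List Int) : Decidable (Spec_rook_occupation_moves i occupations out) := by unfold Spec_rook_occupation_moves; infer_instance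

-- ===== CLAIM (what is proved, stated in full; the proofs are below) =====
def Claim_equal_rook_occupation_moves : Prop := ∀ (i : Int) (occupations : List Int), Dom_rook_occupation_moves i occupations → Spec_rook_occupation_moves i occupations (rook_occupation_moves i occupations)

-- ===== LEMMAS AND PROOFS =====

-- proof-only helper: the (exclusive) stop value of a ray capped at an optional blocker
def pvStop (d c : Int) : Option Int → Int
  | none => d
  | some b => b + c

theorem pvRange8_nil (a b : Int) (h : b ≤ a) : PySem.List.pyRange a b 8 = [] := by
  rw [PySem.List.pyRange_of_pos _ _ (by norm_num : (0:Int) < 8)]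
  rw [if_neg (by omega)]
  simp

theorem pvRange8_cons (a b : Int) (h : a < b) :
    PySem.List.pyRange a b 8 = a :: PySem.List.pyRange (a + 8) b 8 := by
  rw [PySem.List.pyRange_of_pos _ _ (by norm_num : (0:Int) < 8),
      PySem.List.pyRange_of_pos _ _ (by norm_num : (0:Int) < 8)]
  rw [if_pos h]
  have hc : ((b - a + 8 - 1) / 8).toNat
      = (if a + 8 < b then ((b - (a + 8) + 8 - 1) / 8).toNat else 0) + 1 := by
    split_ifs <;> omega
  rw [hc, List.range_succ_eq_map, List.map_cons, List.map_map]
  refine congrArg₂ _ (by norm_num) ?_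
  refine List.map_congr_left ?_
  intro k _
  simp [Function.comp]
  ring

theorem pvRangeNeg8_nil (a b : Int) (h : a ≤ b) : PySem.List.pyRange a b (-8) = [] := by
  simp only [PySem.List.pyRange]
  norm_num
  omega

theorem pvRangeNeg8_cons (a b : Int) (h : b < a) :
    PySem.List.pyRange a b (-8) = a :: PySem.List.pyRange (a - 8) b (-8) := by
  simp only [PySem.List.pyRange]
  norm_num
  rw [if_pos h]
  have hc : ((a - b + 8 - 1) / 8).toNat
      = (if b < a - 8 then ((a - 8 - b + 8 - 1) / 8).toNat else 0) + 1 := by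
    split_ifs <;> omega
  rw [hc, List.range_succ_eq_map, List.map_cons, List.map_map]
  refine congrArg₂ _ (by norm_num) ?_
  refine List.map_congr_left ?_
  intro k _
  simp [Function.comp]
  ring

-- North loop of A = the range capped at the abstract nearest blocker nb
theorem pvNorth_eq (i : Int) (occ : List Int) (nb : Option Int)
    (hmem : ∀ b, nb = some b → b ∈ occ ∧ i < b ∧ b < 64 ∧ b % 8 = i % 8)
    (hmin : ∀ o ∈ occ, i < o → o < 64 → o % 8 = i % 8 → ∃ b, nb = some b ∧ b ≤ o) :
    ∀ (f : Nat) (y : Int) (acc : List Int),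
      (i + y) % 8 = i % 8 → i < i + y → (∀ b, nb = some b → i + y ≤ b) →
      64 - (i + y) ≤ 8 * f →
      pvNorthA i occ f y acc
        = acc ++ PySem.List.pyRange (i + y) (pvStop 64 8 nb) 8 := by
  intro f
  induction f with
  | zero =>
    intro y acc h1 h2 h3 h4
    cases hnb : nb with
    | none => rw [pvNorthA]; simp only [pvStop]; rw [pvRange8_nil _ _ (by omega), List.append_nil]
    | some b =>
      exact absurd ((hmem b hnb).2.2.1) (by have := h3 b hnb; omega)
  | succ f ih =>
    intro y acc h1 h2 h3 h4
    rw [pvNorthA, PySem.Int.floordiv_eq_ediv_of_pos (by norm_num : (0:Int) < 8)]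
    by_cases h : i + y < 64
    · rw [if_pos (by omega)]
      by_cases hm : (i + y) ∈ occ
      · rw [if_pos hm]
        obtain ⟨b, hnb, hble⟩ := hmin (i + y) hm h2 h h1
        have hba : b = i + y := le_antisymm hble (h3 b hnb)
        rw [hnb]
        simp only [pvStop]
        rw [hba, pvRange8_cons _ _ (by omega), pvRange8_nil _ _ (by omega)]
      · rw [if_neg hm]
        have hinv : ∀ b, nb = some b → i + (y + 8) ≤ b := by
          intro b hnb
          obtain ⟨hbocc, hbi, hb64, hbres⟩ := hmem b hnb
          have hne : b ≠ i + y := fun e => hm (e ▸ hbocc)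
          have := h3 b hnb
          omega
        rw [ih (y + 8) (acc ++ [i + y]) (by omega) (by omega) hinv (by omega)]
        have hlt : i + y < (pvStop 64 8 nb) := by
          cases hnb : nb with
          | none => simp only [pvStop]; omega
          | some b => have := h3 b hnb; simp only [pvStop]; omega
        rw [pvRange8_cons _ _ hlt, show i + (y + 8) = i + y + 8 by ring]
        simp
    · rw [if_neg (by omega)]
      cases hnb : nb with
      | none => simp only [pvStop]; rw [pvRange8_nil _ _ (by omega), List.append_nil]
      | some b =>
        exact absurd ((hmem b hnb).2.2.1) (by have := h3 b hnb; omega)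

-- South loop of A = the range capped at the abstract nearest blocker sb
theorem pvSouth_eq (i : Int) (occ : List Int) (sb : Option Int)
    (hmem : ∀ b, sb = some b → b ∈ occ ∧ 0 ≤ b ∧ b < i ∧ b % 8 = i % 8)
    (hmax : ∀ o ∈ occ, 0 ≤ o → o < i → o % 8 = i % 8 → ∃ b, sb = some b ∧ o ≤ b) :
    ∀ (f : Nat) (y : Int) (acc : List Int),
      (i + y) % 8 = i % 8 → i + y < i → (∀ b, sb = some b → b ≤ i + y) →
      i + y + 1 ≤ 8 * f →
      pvSouthA i occ f y acc
        = acc ++ PySem.List.pyRange (i + y) (pvStop (-1) (-8) sb) (-8) := by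
  intro f
  induction f with
  | zero =>
    intro y acc h1 h2 h3 h4
    cases hnb : sb with
    | none => rw [pvSouthA]; simp only [pvStop]; rw [pvRangeNeg8_nil _ _ (by omega), List.append_nil]
    | some b =>
      exact absurd ((hmem b hnb).2.1) (by have := h3 b hnb; omega)
  | succ f ih =>
    intro y acc h1 h2 h3 h4
    rw [pvSouthA, PySem.Int.floordiv_eq_ediv_of_pos (by norm_num : (0:Int) < 8)]
    by_cases h : 0 ≤ i + y
    · rw [if_pos (by omega)]
      by_cases hm : (i + y) ∈ occ
      · rw [if_pos hm]
        obtain ⟨b, hnb, hble⟩ := hmax (i + y) hm h h2 h1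
        have hba : b = i + y := le_antisymm (h3 b hnb) hble
        rw [hnb]
        simp only [pvStop]
        rw [hba, pvRangeNeg8_cons _ _ (by omega), pvRangeNeg8_nil _ _ (by omega)]
      · rw [if_neg hm]
        have hinv : ∀ b, sb = some b → b ≤ i + (y - 8) := by
          intro b hnb
          obtain ⟨hbocc, hb0, hbi, hbres⟩ := hmem b hnb
          have hne : b ≠ i + y := fun e => hm (e ▸ hbocc)
          have := h3 b hnb
          omega
        rw [ih (y - 8) (acc ++ [i + y]) (by omega) (by omega) hinv (by omega)]
        have hlt : (pvStop (-1) (-8) sb) < i + y := by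
          cases hnb : sb with
          | none => simp only [pvStop]; omega
          | some b => have := h3 b hnb; simp only [pvStop]; omega
        rw [pvRangeNeg8_cons _ _ hlt, show i + (y - 8) = i + y - 8 by ring]
        simp
    · rw [if_neg (by omega)]
      cases hnb : sb with
      | none => simp only [pvStop]; rw [pvRangeNeg8_nil _ _ (by omega), List.append_nil]
      | some b =>
        exact absurd ((hmem b hnb).2.1) (by have := h3 b hnb; omega)

-- East loop of A = the range capped at the abstract nearest blocker eb
theorem pvEast_eq (i : Int) (occ : List Int) (eb : Option Int)
    (hmem : ∀ b, eb = some b → b ∈ occ ∧ i < b ∧ b ≤ i + 7 - i % 8)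
    (hmin : ∀ o ∈ occ, i < o → o ≤ i + 7 - i % 8 → ∃ b, eb = some b ∧ b ≤ o) :
    ∀ (f : Nat) (x : Int) (acc : List Int),
      1 ≤ x → x ≤ 8 - i % 8 → (∀ b, eb = some b → i + x ≤ b) →
      i + 8 - i % 8 - (i + x) ≤ f →
      pvEastA i occ f x acc
        = acc ++ PySem.List.pyRange (i + x) (pvStop (i + 8 - i % 8) 1 eb) 1 := by
  intro f
  induction f with
  | zero =>
    intro x acc h1 h2 h3 h4
    cases hnb : eb with
    | none => rw [pvEastA]; simp only [pvStop]; rw [PySem.List.pyRange_one_eq_nil (by omega), List.append_nil]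
    | some b =>
      exact absurd ((hmem b hnb).2.2) (by have := h3 b hnb; omega)
  | succ f ih =>
    intro x acc h1 h2 h3 h4
    rw [pvEastA,
        PySem.Int.mod_eq_emod_of_pos (by norm_num : (0:Int) < 8),
        PySem.Int.mod_eq_emod_of_pos (by norm_num : (0:Int) < 8)]
    by_cases h : x ≤ 7 - i % 8
    · rw [if_pos (by constructor <;> omega)]
      by_cases hm : (i + x) ∈ occ
      · rw [if_pos hm]
        obtain ⟨b, hnb, hble⟩ := hmin (i + x) hm (by omega) (by omega)
        have hba : b = i + x := le_antisymm hble (h3 b hnb)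
        rw [hnb]
        simp only [pvStop]
        rw [hba, PySem.List.pyRange_one_cons (by omega), PySem.List.pyRange_one_eq_nil (by omega)]
      · rw [if_neg hm]
        have hinv : ∀ b, eb = some b → i + (x + 1) ≤ b := by
          intro b hnb
          obtain ⟨hbocc, hbi, hbhi⟩ := hmem b hnb
          have hne : b ≠ i + x := fun e => hm (e ▸ hbocc)
          have := h3 b hnb
          omega
        rw [ih (x + 1) (acc ++ [i + x]) (by omega) (by omega) hinv (by omega)]
        have hlt : i + x < (pvStop (i + 8 - i % 8) 1 eb) := by
          cases hnb : eb with
          | none => simp only [pvStop]; omega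
          | some b => have := h3 b hnb; simp only [pvStop]; omega
        rw [PySem.List.pyRange_one_cons hlt, show i + (x + 1) = i + x + 1 by ring]
        simp
    · rw [if_neg (by omega)]
      cases hnb : eb with
      | none => simp only [pvStop]; rw [PySem.List.pyRange_one_eq_nil (by omega), List.append_nil]
      | some b =>
        exact absurd ((hmem b hnb).2.2) (by have := h3 b hnb; omega)

-- West loop of A = the range capped at the abstract nearest blocker wb
theorem pvWest_eq (i : Int) (occ : List Int) (wb : Option Int)
    (hmem : ∀ b, wb = some b → b ∈ occ ∧ i - i % 8 ≤ b ∧ b < i)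
    (hmax : ∀ o ∈ occ, i - i % 8 ≤ o → o < i → ∃ b, wb = some b ∧ o ≤ b) :
    ∀ (f : Nat) (x : Int) (acc : List Int),
      x ≤ -1 → -(i % 8) - 1 ≤ x → (∀ b, wb = some b → b ≤ i + x) →
      i % 8 + 1 + x ≤ f →
      pvWestA i occ f x acc
        = acc ++ PySem.List.pyRange (i + x) (pvStop (i - i % 8 - 1) (-1) wb) (-1) := by
  intro f
  induction f with
  | zero =>
    intro x acc h1 h2 h3 h4
    cases hnb : wb with
    | none => rw [pvWestA]; simp only [pvStop]; rw [PySem.List.pyRange_neg_one_eq_nil (by omega), List.append_nil]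
    | some b =>
      exact absurd ((hmem b hnb).2.1) (by have := h3 b hnb; omega)
  | succ f ih =>
    intro x acc h1 h2 h3 h4
    rw [pvWestA,
        PySem.Int.mod_eq_emod_of_pos (by norm_num : (0:Int) < 8),
        PySem.Int.mod_eq_emod_of_pos (by norm_num : (0:Int) < 8)]
    by_cases h : -(i % 8) ≤ x
    · rw [if_pos (by constructor <;> omega)]
      by_cases hm : (i + x) ∈ occ
      · rw [if_pos hm]
        obtain ⟨b, hnb, hble⟩ := hmax (i + x) hm (by omega) (by omega)
        have hba : b = i + x := le_antisymm (h3 b hnb) hble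
        rw [hnb]
        simp only [pvStop]
        rw [hba, PySem.List.pyRange_neg_one_cons (by omega), PySem.List.pyRange_neg_one_eq_nil (by omega)]
      · rw [if_neg hm]
        have hinv : ∀ b, wb = some b → b ≤ i + (x - 1) := by
          intro b hnb
          obtain ⟨hbocc, hblo, hbi⟩ := hmem b hnb
          have hne : b ≠ i + x := fun e => hm (e ▸ hbocc)
          have := h3 b hnb
          omega
        rw [ih (x - 1) (acc ++ [i + x]) (by omega) (by omega) hinv (by omega)]
        have hlt : (pvStop (i - i % 8 - 1) (-1) wb) < i + x := by
          cases hnb : wb with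
          | none => simp only [pvStop]; omega
          | some b => have := h3 b hnb; simp only [pvStop]; omega
        rw [PySem.List.pyRange_neg_one_cons hlt, show i + (x - 1) = i + x - 1 by ring]
        simp
    · rw [if_neg (by omega)]
      cases hnb : wb with
      | none => simp only [pvStop]; rw [PySem.List.pyRange_neg_one_eq_nil (by omega), List.append_nil]
      | some b =>
        exact absurd ((hmem b hnb).2.1) (by have := h3 b hnb; omega)

-- ===== VERDICT (by name: the statement is the Claim_ definition above) =====
theorem rook_occupation_moves_spec : Claim_equal_rook_occupation_moves := by
  intro i occ _
  unfold Spec_rook_occupation_moves rook_occupation_moves rook_occupation_moves_alt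
  simp only [PySem.Int.mod_eq_emod_of_pos (by norm_num : (0:Int) < 8)]
  -- hypotheses for the four abstract-blocker lemmas, from min?/max? over the filters
  have hNmem : ∀ b, PySem.List.min? (occ.filter (fun o => decide (i < o ∧ o < 64 ∧ o % 8 = i % 8))) (fun x => x) = some b →
      b ∈ occ ∧ i < b ∧ b < 64 ∧ b % 8 = i % 8 := by
    intro b hb
    have h := PySem.List.min?_mem hb
    rw [List.mem_filter, decide_eq_true_eq] at h
    exact ⟨h.1, h.2⟩
  have hNmin : ∀ o ∈ occ, i < o → o < 64 → o % 8 = i % 8 →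
      ∃ b, PySem.List.min? (occ.filter (fun o => decide (i < o ∧ o < 64 ∧ o % 8 = i % 8))) (fun x => x) = some b ∧ b ≤ o := by
    intro o ho h1 h2 h3
    have hof : o ∈ occ.filter (fun o => decide (i < o ∧ o < 64 ∧ o % 8 = i % 8)) := by
      rw [List.mem_filter, decide_eq_true_eq]; exact ⟨ho, h1, h2, h3⟩
    cases hb : PySem.List.min? (occ.filter (fun o => decide (i < o ∧ o < 64 ∧ o % 8 = i % 8))) (fun x => x) with
    | none => rw [PySem.List.min?_eq_none_iff] at hb; rw [hb] at hof; simp at hof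
    | some b => exact ⟨b, rfl, PySem.List.min?_isMin hb o hof⟩
  have hSmem : ∀ b, PySem.List.max? (occ.filter (fun o => decide (0 ≤ o ∧ o < i ∧ o % 8 = i % 8))) (fun x => x) = some b →
      b ∈ occ ∧ 0 ≤ b ∧ b < i ∧ b % 8 = i % 8 := by
    intro b hb
    have h := PySem.List.max?_mem hb
    rw [List.mem_filter, decide_eq_true_eq] at h
    exact ⟨h.1, h.2⟩
  have hSmax : ∀ o ∈ occ, 0 ≤ o → o < i → o % 8 = i % 8 →
      ∃ b, PySem.List.max? (occ.filter (fun o => decide (0 ≤ o ∧ o < i ∧ o % 8 = i % 8))) (fun x => x) = some b ∧ o ≤ b := by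
    intro o ho h1 h2 h3
    have hof : o ∈ occ.filter (fun o => decide (0 ≤ o ∧ o < i ∧ o % 8 = i % 8)) := by
      rw [List.mem_filter, decide_eq_true_eq]; exact ⟨ho, h1, h2, h3⟩
    cases hb : PySem.List.max? (occ.filter (fun o => decide (0 ≤ o ∧ o < i ∧ o % 8 = i % 8))) (fun x => x) with
    | none => rw [PySem.List.max?_eq_none_iff] at hb; rw [hb] at hof; simp at hof
    | some b => exact ⟨b, rfl, PySem.List.max?_isMax hb o hof⟩
  have hEmem : ∀ b, PySem.List.min? (occ.filter (fun o => decide (i < o ∧ o ≤ i + 7 - i % 8))) (fun x => x) = some b →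
      b ∈ occ ∧ i < b ∧ b ≤ i + 7 - i % 8 := by
    intro b hb
    have h := PySem.List.min?_mem hb
    rw [List.mem_filter, decide_eq_true_eq] at h
    exact ⟨h.1, h.2⟩
  have hEmin : ∀ o ∈ occ, i < o → o ≤ i + 7 - i % 8 →
      ∃ b, PySem.List.min? (occ.filter (fun o => decide (i < o ∧ o ≤ i + 7 - i % 8))) (fun x => x) = some b ∧ b ≤ o := by
    intro o ho h1 h2
    have hof : o ∈ occ.filter (fun o => decide (i < o ∧ o ≤ i + 7 - i % 8)) := by
      rw [List.mem_filter, decide_eq_true_eq]; exact ⟨ho, h1, h2⟩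
    cases hb : PySem.List.min? (occ.filter (fun o => decide (i < o ∧ o ≤ i + 7 - i % 8))) (fun x => x) with
    | none => rw [PySem.List.min?_eq_none_iff] at hb; rw [hb] at hof; simp at hof
    | some b => exact ⟨b, rfl, PySem.List.min?_isMin hb o hof⟩
  have hWmem : ∀ b, PySem.List.max? (occ.filter (fun o => decide (i - i % 8 ≤ o ∧ o < i))) (fun x => x) = some b →
      b ∈ occ ∧ i - i % 8 ≤ b ∧ b < i := by
    intro b hb
    have h := PySem.List.max?_mem hb
    rw [List.mem_filter, decide_eq_true_eq] at h
    exact ⟨h.1, h.2⟩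
  have hWmax : ∀ o ∈ occ, i - i % 8 ≤ o → o < i →
      ∃ b, PySem.List.max? (occ.filter (fun o => decide (i - i % 8 ≤ o ∧ o < i))) (fun x => x) = some b ∧ o ≤ b := by
    intro o ho h1 h2
    have hof : o ∈ occ.filter (fun o => decide (i - i % 8 ≤ o ∧ o < i)) := by
      rw [List.mem_filter, decide_eq_true_eq]; exact ⟨ho, h1, h2⟩
    cases hb : PySem.List.max? (occ.filter (fun o => decide (i - i % 8 ≤ o ∧ o < i))) (fun x => x) with
    | none => rw [PySem.List.max?_eq_none_iff] at hb; rw [hb] at hof; simp at hof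
    | some b => exact ⟨b, rfl, PySem.List.max?_isMax hb o hof⟩
  rw [pvNorth_eq i occ _ hNmem hNmin ((64 - i).toNat) 8 []
        (by omega) (by omega) (fun b hb => by have := (hNmem b hb).2; omega) (by omega),
      pvSouth_eq i occ _ hSmem hSmax ((i + 1).toNat) (-8) _
        (by omega) (by omega) (fun b hb => by have := (hSmem b hb).2; omega) (by omega),
      pvEast_eq i occ _ hEmem hEmin 8 1 _
        (by omega) (by omega) (fun b hb => by have := (hEmem b hb).2; omega) (by omega),
      pvWest_eq i occ _ hWmem hWmax 8 (-1) _
        (by omega) (by omega) (fun b hb => by have := (hWmem b hb).2; omega) (by omega)]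
  rw [show i + -1 = i - 1 by ring, show i + -8 = i - 8 by ring]
  generalize PySem.List.min? (occ.filter (fun o => decide (i < o ∧ o < 64 ∧ o % 8 = i % 8))) (fun x => x) = oN
  generalize PySem.List.max? (occ.filter (fun o => decide (0 ≤ o ∧ o < i ∧ o % 8 = i % 8))) (fun x => x) = oS
  generalize PySem.List.min? (occ.filter (fun o => decide (i < o ∧ o ≤ i + 7 - i % 8))) (fun x => x) = oE
  generalize PySem.List.max? (occ.filter (fun o => decide (i - i % 8 ≤ o ∧ o < i))) (fun x => x) = oW
  cases oN <;> cases oS <;> cases oE <;> cases oW <;> simp [pvStop, List.append_assoc, sub_eq_add_neg]
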